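-- pv_equiv track=rewrite | github.com/Goukart/faust | Tools.py | col_format
-- ===== SOURCE A (Python) =====
-- def columnify(iterable):
--     # First convert everything to its str
--     strings = [str(x) for x in iterable]  # repr seems to be for debugging
--     # Now pad all the strings to match the widest
--     widest = max(len(x) for x in strings)
--     padded = [x.ljust(widest) for x in strings]
--     return padded
--
-- def col_format(iterable, width=120):
--     if len(iterable) < 1:
--         return ""
--
--     columns = columnify(iterable)
--     colwidth = len(columns[0]) + 2
--     per_line = (width - 4) // colwidth
--     text = ""
--     for i, column in enumerate(columns):
--         text += column + '\t'
--         if i % per_line == per_line - 1: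
--             text += '\n'
--     text += '\n'
--     return text
-- ===== SOURCE B (Python) =====
-- def col_format(iterable, width=120):
--     # Same output as the original, restructured: pad while rendering and walk the
--     # items chunk by chunk (one chunk per output line) instead of testing i % per_line.
--     strings = [str(x) for x in iterable]
--     if not strings:
--         return ""
--     widest = max(len(s) for s in strings)
--     per_line = (width - 4) // (widest + 2)
--     step = per_line if per_line > 0 else len(strings)
--     text = ""
--     rest = strings
--     while rest:
--         chunk, rest = rest[:step], rest[step:]
--         text += ''.join(s.ljust(widest) + '\t' for s in chunk)
--         if len(chunk) == per_line:
--             text += '\n'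
--     return text + '\n'
-- ===== Notes on version B (the rewrite author's own statement) =====
-- stated objective: alternative
-- what changed: B replaces A's single enumerate loop with an 'i % per_line' newline test by a chunked walk: it peels consecutive chunks of per_line items off the list, rendering (and padding) each chunk as one output line, emitting the newline when a chunk is complete.
-- crash fix: On a nonempty list with 4 <= width < widest+6, per_line is 0 and A raises ZeroDivisionError at 'i % per_line'; B puts all items on a single line and returns it. — e.g. on col_format(["a"], 4): A raises ZeroDivisionError, B returns "a\t\n"
import Mathlib
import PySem

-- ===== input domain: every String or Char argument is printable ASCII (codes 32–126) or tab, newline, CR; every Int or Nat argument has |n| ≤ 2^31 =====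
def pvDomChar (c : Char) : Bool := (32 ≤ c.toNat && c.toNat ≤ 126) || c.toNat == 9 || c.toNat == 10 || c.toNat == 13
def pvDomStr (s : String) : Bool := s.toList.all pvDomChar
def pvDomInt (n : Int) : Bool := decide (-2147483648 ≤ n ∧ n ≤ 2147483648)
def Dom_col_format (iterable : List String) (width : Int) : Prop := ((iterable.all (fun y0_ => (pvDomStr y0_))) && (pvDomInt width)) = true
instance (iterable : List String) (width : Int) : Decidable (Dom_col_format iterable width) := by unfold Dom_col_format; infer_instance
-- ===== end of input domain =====

-- B replaces the enumerate/modulo newline test by a chunked walk (one chunk of per_line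
-- items per output line), padding while rendering; objective: alternative decomposition.

-- ===== PORT A =====
-- str.ljust(w) with the default space fill; exact (w ≤ len(s) and w < 0 leave s unchanged)
def pyLjust (s : String) (w : Int) : String :=
  String.ofList (s.toList ++ List.replicate (w.toNat - s.toList.length) ' ')

def columnify (iterable : List String) : List String :=
  let strings := iterable.map (fun x => x)  -- [str(x) for x in iterable]: identity on strings
  -- max(...) raises on an empty list; col_format only calls columnify on a nonempty one,
  -- so the .getD 0 default is never read
  let widest := (PySem.List.max? (strings.map (fun x => PySem.Str.len x)) id).getD 0
  strings.map (fun x => pyLjust x widest)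

def col_format (iterable : List String) (width : Int) : String :=
  if PySem.List.len iterable < 1 then "" else
    let columns := columnify iterable
    let colwidth := PySem.Str.len (PySem.List.pyGetD columns 0 "") + 2  -- columns[0]; in range (nonempty)
    let per_line := PySem.Int.floordiv (width - 4) colwidth
    let text := (PySem.List.enumerate columns).foldl (fun text ic =>
        let text := text ++ ic.2 ++ "\t"
        if PySem.Int.mod ic.1 per_line == per_line - 1 then text ++ "\n" else text) ""
    text ++ "\n"

-- ===== PORT B =====
-- ''.join(...) ported step for step as a left fold over the mapped list (exact)
def pyJoin (parts : List String) : String := parts.foldl (· ++ ·) ""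

def chunkRender (widest : Int) (chunk : List String) : String :=
  pyJoin (chunk.map (fun s => pyLjust s widest ++ "\t"))

-- the while loop of Source B: peel one chunk per iteration; the fuel argument (always
-- called with fuel = |rest|, and one item at least is consumed per round) only makes
-- the recursion structural, it never changes the computed value
def chunkLoop (widest per_line : Int) (step : Nat) : Nat → List String → String
  | _, [] => ""
  | 0, _ :: _ => ""  -- fuel exhausted: unreachable
  | fuel + 1, x :: xs =>
      chunkRender widest ((x :: xs).take step) ++
        ((if (((x :: xs).take step).length : Int) == per_line then "\n" else "") ++
          chunkLoop widest per_line step fuel ((x :: xs).drop step))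

def col_format_alt (iterable : List String) (width : Int) : String :=
  if iterable = [] then "" else
    let widest := (PySem.List.max? (iterable.map (fun x => PySem.Str.len x)) id).getD 0
    let per_line := PySem.Int.floordiv (width - 4) (widest + 2)
    let step := if per_line > 0 then per_line.toNat else iterable.length
    chunkLoop widest per_line step iterable.length iterable ++ "\n"

-- ===== PRECONDITION & SPEC =====
-- Pre_ excludes exactly the inputs where A raises ZeroDivisionError: a nonempty list with
-- 4 ≤ width < widest + 6 makes per_line = 0 and 'i % per_line' divides by zero.
def Pre_col_format (iterable : List String) (width : Int) : Prop :=
  iterable = [] ∨ width < 4 ∨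
    (PySem.List.max? (iterable.map (fun x => PySem.Str.len x)) id).getD 0 + 6 ≤ width
instance (iterable : List String) (width : Int) : Decidable (Pre_col_format iterable width) := by
  unfold Pre_col_format; infer_instance

def pvWitness_col_format : List String × Int := (["ab", "c"], 120)

-- On a nonempty list with 4 ≤ width < widest + 6, A raises ZeroDivisionError (per_line = 0);
-- B puts all items on a single line and returns it.
def Raises_col_format (iterable : List String) (width : Int) : Prop :=
  iterable ≠ [] ∧ 4 ≤ width ∧
    width < (PySem.List.max? (iterable.map (fun x => PySem.Str.len x)) id).getD 0 + 6
instance (iterable : List String) (width : Int) : Decidable (Raises_col_format iterable width) := by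
  unfold Raises_col_format; infer_instance

def pvRaiseWitness_col_format : List String × Int := (["a"], 4)
def pvRaiseWitnessOut_col_format : String := "a\t\n"

def Spec_col_format (iterable : List String) (width : Int) (out : String) : Prop := out = col_format_alt iterable width
instance (iterable : List String) (width : Int) (out : String) : Decidable (Spec_col_format iterable width out) := by unfold Spec_col_format; infer_instance

-- ===== CLAIM (what is proved, stated in full; the proofs are below) =====
def Claim_equal_col_format : Prop := ∀ (iterable : List String) (width : Int), Dom_col_format iterable width → Pre_col_format iterable width → Spec_col_format iterable width (col_format iterable width)

def Claim_raises_col_format : Prop := (∀ (iterable : List String) (width : Int), Dom_col_format iterable width → Raises_col_format iterable width → ¬ Pre_col_format iterable width) ∧ (Dom_col_format (pvRaiseWitness_col_format.1) (pvRaiseWitness_col_format.2) ∧ Raises_col_format (pvRaiseWitness_col_format.1) (pvRaiseWitness_col_format.2) ∧ col_format_alt (pvRaiseWitness_col_format.1) (pvRaiseWitness_col_format.2) = pvRaiseWitnessOut_col_format)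

-- ===== LEMMAS AND PROOFS =====

-- model of A's loop body output from index i on (text accumulates on the left)
def arend (p : Int) : Int → List String → String
  | _, [] => ""
  | i, c :: cs => c ++ "\t" ++ ((if PySem.Int.mod i p == p - 1 then "\n" else "") ++ arend p (i + 1) cs)

-- rendering with no newline ever fired
def crend : List String → String
  | [] => ""
  | c :: cs => c ++ "\t" ++ crend cs

theorem arend_cons (p i : Int) (c : String) (cs : List String) :
    arend p i (c :: cs)
      = c ++ "\t" ++ ((if PySem.Int.mod i p == p - 1 then "\n" else "") ++ arend p (i + 1) cs) := rfl

theorem chunkLoop_nil (w p : Int) (s fuel : Nat) : chunkLoop w p s fuel [] = "" := by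
  cases fuel <;> rfl

theorem chunkLoop_succ (w p : Int) (s fuel : Nat) (x : String) (xs : List String) :
    chunkLoop w p s (fuel + 1) (x :: xs)
      = chunkRender w ((x :: xs).take s) ++
          ((if (((x :: xs).take s).length : Int) == p then "\n" else "") ++
            chunkLoop w p s fuel ((x :: xs).drop s)) := rfl

theorem foldA (p : Int) : ∀ (cs : List String) (i : Int) (t : String),
    (PySem.List.enumerate cs i).foldl (fun text ic =>
        if PySem.Int.mod ic.1 p == p - 1 then text ++ ic.2 ++ "\t" ++ "\n"
        else text ++ ic.2 ++ "\t") t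
      = t ++ arend p i cs := by
  intro cs
  induction cs with
  | nil => intro i t; simp [PySem.List.enumerate_nil, arend]
  | cons c cs ih =>
    intro i t
    rw [PySem.List.enumerate_cons]
    simp only [List.foldl_cons]
    rw [ih, arend_cons]
    simp only [beq_iff_eq]
    by_cases h : PySem.Int.mod i p = p - 1
    · rw [if_pos h, if_pos h]
      simp only [String.append_assoc]
    · rw [if_neg h, if_neg h]
      simp only [String.append_assoc, String.empty_append]

theorem crend_join (w : Int) : ∀ (chunk : List String) (t : String),
    (chunk.map (fun s => pyLjust s w ++ "\t")).foldl (· ++ ·) t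
      = t ++ crend (chunk.map (fun s => pyLjust s w)) := by
  intro chunk
  induction chunk with
  | nil => intro t; simp [crend]
  | cons c cs ih =>
    intro t
    simp only [List.map_cons, List.foldl_cons]
    rw [ih]
    simp only [crend, String.append_assoc]

theorem chunkRender_eq (w : Int) (chunk : List String) :
    chunkRender w chunk = crend (chunk.map (fun s => pyLjust s w)) := by
  unfold chunkRender pyJoin
  rw [crend_join]
  simp only [String.empty_append]

theorem arend_no_pos (p : Int) (hp : 0 < p) : ∀ (cs : List String) (i : Int),
    0 ≤ i → i + cs.length < p → arend p i cs = crend cs := by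
  intro cs
  induction cs with
  | nil => intro i _ _; rfl
  | cons c cs ih =>
    intro i h0 hlt
    simp only [List.length_cons] at hlt
    push_cast at hlt
    have hm : PySem.Int.mod i p = i := by
      rw [PySem.Int.mod_eq_emod_of_pos hp]
      exact Int.emod_eq_of_lt h0 (by omega)
    have hne : PySem.Int.mod i p ≠ p - 1 := by omega
    rw [arend_cons]
    simp only [beq_iff_eq]
    rw [if_neg hne, ih (i + 1) (by omega) (by push_cast; omega)]
    simp only [crend, String.append_assoc, String.empty_append]

theorem arend_no_neg (p : Int) (hp : p < 0) : ∀ (cs : List String) (i : Int),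
    arend p i cs = crend cs := by
  intro cs
  induction cs with
  | nil => intro i; rfl
  | cons c cs ih =>
    intro i
    have hne : PySem.Int.mod i p ≠ p - 1 := by
      rcases PySem.Int.mod_neg_bounds i hp with ⟨h1, h2⟩
      intro heq; rw [heq] at h1; omega
    rw [arend_cons]
    simp only [beq_iff_eq]
    rw [if_neg hne, ih]
    simp only [crend, String.append_assoc, String.empty_append]

theorem arend_full (p : Int) (hp : 0 < p) : ∀ (cs : List String) (i : Int),
    0 ≤ i → i < p → i + cs.length = p → arend p i cs = crend cs ++ "\n" := by
  intro cs
  induction cs with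
  | nil =>
    intro i _ hlt hlen
    simp only [List.length_nil, Nat.cast_zero, add_zero] at hlen
    omega
  | cons c cs ih =>
    intro i h0 hlt hlen
    simp only [List.length_cons] at hlen
    push_cast at hlen
    have hm : PySem.Int.mod i p = i := by
      rw [PySem.Int.mod_eq_emod_of_pos hp]
      exact Int.emod_eq_of_lt h0 hlt
    cases cs with
    | nil =>
      simp only [List.length_nil, Nat.cast_zero] at hlen
      have heq : PySem.Int.mod i p = p - 1 := by omega
      rw [arend_cons]
      simp only [beq_iff_eq]
      rw [if_pos heq]
      simp only [arend, crend, String.append_assoc, String.append_empty]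
    | cons d ds =>
      have hlen' : i + ((ds.length : Int) + 1 + 1) = p := by
        simp only [List.length_cons] at hlen; push_cast at hlen; omega
      have hne : PySem.Int.mod i p ≠ p - 1 := by omega
      rw [arend_cons]
      simp only [beq_iff_eq]
      rw [if_neg hne, ih (i + 1) (by omega) (by omega) (by push_cast; omega)]
      simp only [crend, String.append_assoc, String.empty_append]

theorem arend_append (p : Int) : ∀ (as bs : List String) (i : Int),
    arend p i (as ++ bs) = arend p i as ++ arend p (i + as.length) bs := by
  intro as
  induction as with
  | nil => intro bs i; simp [arend]
  | cons a as ih =>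
    intro bs i
    rw [List.cons_append, arend_cons, arend_cons, ih]
    have h1 : i + (((a :: as).length : Nat) : Int) = i + 1 + as.length := by
      simp only [List.length_cons]; push_cast; ring
    rw [h1]
    simp only [String.append_assoc]

theorem arend_shift (p : Int) (hp : 0 < p) : ∀ (cs : List String) (i : Int),
    arend p (i + p) cs = arend p i cs := by
  intro cs
  induction cs with
  | nil => intro i; rfl
  | cons c cs ih =>
    intro i
    have hm : PySem.Int.mod (i + p) p = PySem.Int.mod i p := by
      rw [PySem.Int.mod_eq_emod_of_pos hp, PySem.Int.mod_eq_emod_of_pos hp,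
        Int.add_emod_right]
    have h1 : i + p + 1 = (i + 1) + p := by ring
    rw [arend_cons, arend_cons, hm, h1, ih]

theorem chunk_main (w p : Int) (hp : 0 < p) : ∀ (fuel : Nat) (l : List String), l.length ≤ fuel →
    arend p 0 (l.map (fun s => pyLjust s w)) = chunkLoop w p p.toNat fuel l := by
  intro fuel
  induction fuel with
  | zero =>
    intro l hl
    have hnil : l = [] := by cases l <;> simp_all
    subst hnil
    rfl
  | succ n ih =>
    intro l hl
    cases l with
    | nil => rfl
    | cons x xs =>
      rw [chunkLoop_succ]
      by_cases hlen : (x :: xs).length < p.toNat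
      · -- final partial chunk
        have ht : (x :: xs).take p.toNat = x :: xs := List.take_of_length_le (by omega)
        have hd : (x :: xs).drop p.toNat = [] := List.drop_eq_nil_of_le (by omega)
        rw [ht, hd, chunkLoop_nil]
        rw [arend_no_pos p hp _ 0 le_rfl (by simp only [List.length_map]; push_cast; omega),
          chunkRender_eq]
        simp only [beq_iff_eq]
        rw [if_neg (by omega : ¬ ((((x :: xs).length : Nat) : Int) = p))]
        simp only [String.append_empty, String.empty_append]
      · -- a full chunk then the rest
        have hsplit : x :: xs = (x :: xs).take p.toNat ++ (x :: xs).drop p.toNat :=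
          (List.take_append_drop _ _).symm
        have hlt : (((x :: xs).take p.toNat).length : Nat) = p.toNat := by
          simp only [List.length_take]; omega
        conv_lhs => rw [hsplit]
        rw [List.map_append, arend_append]
        have hcast : ((((((x :: xs).take p.toNat).map (fun s => pyLjust s w)).length : Nat) : Int)) = p := by
          simp only [List.length_map, hlt]; omega
        rw [hcast]
        have hshift : arend p (0 + p) (((x :: xs).drop p.toNat).map (fun s => pyLjust s w))
            = arend p 0 (((x :: xs).drop p.toNat).map (fun s => pyLjust s w)) :=
          arend_shift p hp _ 0
        rw [hshift,
          ih ((x :: xs).drop p.toNat) (by simp only [List.length_drop]; simp only [List.length_cons] at hl ⊢; omega)]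
        rw [arend_full p hp _ 0 le_rfl (by omega) (by simp only [List.length_map, hlt]; omega)]
        rw [chunkRender_eq]
        simp only [beq_iff_eq]
        rw [if_pos (by rw [hlt]; omega : ((((x :: xs).take p.toNat).length : Nat) : Int) = p)]
        simp only [String.append_assoc]

theorem chunk_neg (w p : Int) (hp : p < 0) (l : List String) (hl : l ≠ []) :
    arend p 0 (l.map (fun s => pyLjust s w)) = chunkLoop w p l.length l.length l := by
  cases l with
  | nil => simp at hl
  | cons x xs =>
    have hlen : (x :: xs).length = xs.length + 1 := rfl
    rw [hlen, chunkLoop_succ]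
    have ht : (x :: xs).take (xs.length + 1) = x :: xs := List.take_of_length_le (by simp)
    have hd : (x :: xs).drop (xs.length + 1) = [] := List.drop_eq_nil_of_le (by simp)
    rw [ht, hd, chunkLoop_nil]
    rw [arend_no_neg p hp, chunkRender_eq]
    simp only [beq_iff_eq]
    rw [if_neg (by omega : ¬ ((((x :: xs).length : Nat) : Int) = p))]
    simp only [String.append_empty, String.empty_append]

theorem len_pyLjust (s : String) (w : Int) (h : PySem.Str.len s ≤ w) :
    PySem.Str.len (pyLjust s w) = w := by
  unfold pyLjust
  rw [PySem.Str.len_eq] at h ⊢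
  simp only [String.toList_ofList, List.length_append, List.length_replicate]
  omega

theorem main_eq (l : List String) (w q : Int) (hne : l ≠ []) (hq : q < 0 ∨ 0 < q) :
    (PySem.List.enumerate (l.map (fun x => pyLjust x w))).foldl
        (fun text ic =>
          if PySem.Int.mod ic.1 q == q - 1 then text ++ ic.2 ++ "\t" ++ "\n"
          else text ++ ic.2 ++ "\t") "" ++ "\n"
      = chunkLoop w q (if q > 0 then q.toNat else l.length) l.length l ++ "\n" := by
  rw [foldA, String.empty_append]
  rcases hq with hq | hq
  · rw [if_neg (by omega : ¬ q > 0), chunk_neg w q hq l hne]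
  · rw [if_pos (by omega : q > 0), chunk_main w q hq l.length l le_rfl]

-- ===== VERDICT (by name: the statement is the Claim_ definition above) =====
theorem col_format_spec : Claim_equal_col_format := by
  unfold Claim_equal_col_format
  intro iterable width _ hPre
  unfold Spec_col_format
  cases iterable with
  | nil => rfl
  | cons y ys =>
    have hne : (y :: ys : List String) ≠ [] := by simp
    have hc1 : ¬ (PySem.List.len (y :: ys : List String) < 1) := by
      rw [PySem.List.len_eq]
      simp only [List.length_cons]
      push_cast
      omega
    unfold col_format col_format_alt columnify
    rw [if_neg hc1, if_neg hne]
    simp only [List.map_id']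
    obtain ⟨m, hm⟩ : ∃ m, PySem.List.max? ((y :: ys).map (fun x => PySem.Str.len x)) id = some m := by
      cases h : PySem.List.max? ((y :: ys).map (fun x => PySem.Str.len x)) id with
      | none => rw [PySem.List.max?_eq_none_iff] at h; simp at h
      | some m => exact ⟨m, rfl⟩
    have hw0 : PySem.Str.len y ≤ m := by
      have hmem : PySem.Str.len y ∈ (y :: ys).map (fun x => PySem.Str.len x) := by simp
      simpa using PySem.List.max?_isMax hm (PySem.Str.len y) hmem
    have hmnn : 0 ≤ m := by
      have h0 : (0 : Int) ≤ PySem.Str.len y := by rw [PySem.Str.len_eq]; positivity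
      omega
    have hget : PySem.List.pyGetD ((y :: ys).map (fun x => pyLjust x m)) 0 "" = pyLjust y m := by
      simp only [List.map_cons]
      exact PySem.List.pyGetD_zero_cons _ _ _
    simp only [hm, Option.getD_some, hget, len_pyLjust y m hw0]
    -- the per-line count is nonzero on Pre_
    have hPre' : width < 4 ∨ m + 6 ≤ width := by
      rcases hPre with h | h | h
      · exact absurd h hne
      · exact Or.inl h
      · rw [hm] at h; simpa using Or.inr h
    have hq : PySem.Int.floordiv (width - 4) (m + 2) < 0 ∨ 0 < PySem.Int.floordiv (width - 4) (m + 2) := by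
      rcases hPre' with hlt | hge
      · left
        rw [PySem.Int.floordiv_lt_iff_lt_mul (by omega)]
        omega
      · right
        have := (PySem.Int.le_floordiv_iff_mul_le (a := width - 4) (b := m + 2) (q := 1) (by omega)).mpr (by omega)
        omega
    exact main_eq (y :: ys) m (PySem.Int.floordiv (width - 4) (m + 2)) hne hq

def col_format_raises : Claim_raises_col_format := by
  unfold Claim_raises_col_format
  constructor
  · intro iterable width _ hR hP
    obtain ⟨h1, h2, h3⟩ := hR
    rcases hP with h | h | h
    · exact h1 h
    · omega
    · omega
  · exact ⟨by decide, by decide, by decide⟩
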